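-- pv_equiv track=rewrite | github.com/raj713335/LeetCode | Easy/0914 X of a Kind in a Deck of Cards.py | hasGroupsSizeX
-- ===== SOURCE A (Python) =====
-- from typing import List
--
-- import math
--
-- def hasGroupsSizeX(deck: List[int]) -> bool:
--
--     dictx = {}
--
--     for i in range(0, len(deck)):
--         if deck[i] not in dictx.keys():
--             dictx[deck[i]] = 1
--         else:
--             dictx[deck[i]] += 1
--
--     set_dictx = list(dictx.values())
--
--     if math.gcd(*set_dictx) > 1:
--         return True
--     else:
--         return False
-- ===== SOURCE B (Python) =====
-- from typing import List
--
-- def hasGroupsSizeX(deck: List[int]) -> bool: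
--     counts = {}
--     for c in deck:
--         counts[c] = counts.get(c, 0) + 1
--     vals = list(counts.values())
--     if not vals:
--         return False
--     m = min(vals)
--     for x in range(2, m + 1):
--         if all(v % x == 0 for v in vals):
--             return True
--     return False
-- ===== Notes on version B (the rewrite author's own statement) =====
-- stated objective: idiomatic
-- what changed: Replaces the variadic gcd fold over the frequency values by explicit trial division: try every candidate group size x from 2 up to the minimum count and return True as soon as x divides every count.
import Mathlib
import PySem

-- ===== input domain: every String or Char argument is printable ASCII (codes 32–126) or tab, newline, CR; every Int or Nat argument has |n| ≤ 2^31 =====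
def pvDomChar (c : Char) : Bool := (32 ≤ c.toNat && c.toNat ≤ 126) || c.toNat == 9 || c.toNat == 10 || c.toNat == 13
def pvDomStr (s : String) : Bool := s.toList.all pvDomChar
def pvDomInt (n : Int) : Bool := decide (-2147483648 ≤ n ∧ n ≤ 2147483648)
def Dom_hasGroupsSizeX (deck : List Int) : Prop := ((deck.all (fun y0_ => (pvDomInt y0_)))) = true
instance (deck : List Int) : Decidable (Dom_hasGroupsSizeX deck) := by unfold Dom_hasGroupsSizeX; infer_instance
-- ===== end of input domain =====

-- B replaces A's variadic-gcd fold over the frequency values by explicit trial division over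
-- candidate group sizes 2..min(counts); same results, a differently shaped algorithm (objective: idiomatic/alternative).

-- ===== PORT A =====
def hasGroupsSizeX (deck : List Int) : Bool :=
  -- dictx = {}; for i in range(0, len(deck)): if deck[i] not in dictx: dictx[deck[i]] = 1 else: += 1
  let dictx : PySem.Dict Int Int :=
    (PySem.List.pyRange 0 (PySem.List.len deck)).foldl
      (fun d i =>
        if !(d.contains (PySem.List.pyGetD deck i 0)) then d.insert (PySem.List.pyGetD deck i 0) 1
        else d.insert (PySem.List.pyGetD deck i 0) (d.getD (PySem.List.pyGetD deck i 0) 0 + 1))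
      PySem.Dict.empty
  let set_dictx := dictx.values
  -- math.gcd(*set_dictx) = fold of gcd starting from 0
  if set_dictx.foldl (fun g v => ((Int.gcd g v : Nat) : Int)) 0 > 1 then true else false

-- ===== PORT B =====
def hasGroupsSizeX_alt (deck : List Int) : Bool :=
  -- counts: for c in deck: counts[c] = counts.get(c, 0) + 1
  let counts : PySem.Dict Int Int :=
    deck.foldl (fun d c => d.insert c (d.getD c 0 + 1)) PySem.Dict.empty
  let vals := counts.values
  -- if not vals: return False; m = min(vals); for x in range(2, m+1): if all(v % x == 0): return True; return False
  match PySem.List.min? vals id with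
  | none => false
  | some m => (PySem.List.pyRange 2 (m + 1)).any (fun x => vals.all (fun v => PySem.Int.mod v x == 0))

-- ===== PRECONDITION & SPEC =====
def Spec_hasGroupsSizeX (deck : List Int) (out : Bool) : Prop := out = hasGroupsSizeX_alt deck
instance (deck : List Int) (out : Bool) : Decidable (Spec_hasGroupsSizeX deck out) := by unfold Spec_hasGroupsSizeX; infer_instance

-- ===== CLAIM (what is proved, stated in full; the proofs are below) =====
def Claim_equal_hasGroupsSizeX : Prop := ∀ (deck : List Int), Dom_hasGroupsSizeX deck → Spec_hasGroupsSizeX deck (hasGroupsSizeX deck)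

-- ===== LEMMAS AND PROOFS =====

-- A's Int-valued gcd fold is the cast of the Nat-valued gcd fold over absolute values.
lemma foldl_gcd_cast (L : List Int) (n : Nat) :
    L.foldl (fun g v => ((Int.gcd g v : Nat) : Int)) (n : Int)
      = ((L.foldl (fun g v => Nat.gcd g v.natAbs) n : Nat) : Int) := by
  induction L generalizing n with
  | nil => simp
  | cons h t ih => simpa [Int.gcd] using ih (Nat.gcd n h.natAbs)

lemma foldl_gcd_dvd_init (L : List Int) (n : Nat) :
    (L.foldl (fun g v => Nat.gcd g v.natAbs) n) ∣ n := by
  induction L generalizing n with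
  | nil => simp
  | cons h t ih => exact dvd_trans (ih (Nat.gcd n h.natAbs)) (Nat.gcd_dvd_left _ _)

lemma foldl_gcd_dvd_mem (L : List Int) (n : Nat) :
    ∀ v ∈ L, (L.foldl (fun g v => Nat.gcd g v.natAbs) n) ∣ v.natAbs := by
  induction L generalizing n with
  | nil => simp
  | cons h t ih =>
    intro v hv
    rcases List.mem_cons.mp hv with rfl | hv
    · exact dvd_trans (foldl_gcd_dvd_init t (Nat.gcd n v.natAbs)) (Nat.gcd_dvd_right _ _)
    · exact ih (Nat.gcd n h.natAbs) v hv

lemma dvd_foldl_gcd (L : List Int) (n x : Nat) (hn : x ∣ n) (h : ∀ v ∈ L, x ∣ v.natAbs) :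
    x ∣ L.foldl (fun g v => Nat.gcd g v.natAbs) n := by
  induction L generalizing n with
  | nil => simpa using hn
  | cons hd t ih =>
    exact ih (Nat.gcd n hd.natAbs) (Nat.dvd_gcd hn (h hd (by simp)))
      (fun v hv => h v (List.mem_cons_of_mem _ hv))

-- Core equivalence: gcd of a list of positive ints exceeds 1 iff some x in 2..min divides them all.
lemma gcd_trial_equiv (L : List Int) (hpos : ∀ v ∈ L, 0 < v) :
    (if L.foldl (fun g v => ((Int.gcd g v : Nat) : Int)) 0 > 1 then true else false)
      = match PySem.List.min? L id with
        | none => false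
        | some m => (PySem.List.pyRange 2 (m + 1)).any (fun x => L.all (fun v => PySem.Int.mod v x == 0)) := by
  set G : Nat := L.foldl (fun g v => Nat.gcd g v.natAbs) 0 with hG
  have hfold : L.foldl (fun g v => ((Int.gcd g v : Nat) : Int)) 0 = (G : Int) := by
    simpa using foldl_gcd_cast L 0
  cases hmin : PySem.List.min? L id with
  | none =>
    have : L = [] := (PySem.List.min?_eq_none_iff L id).mp hmin
    subst this
    simp
  | some m =>
    have hmL : m ∈ L := PySem.List.min?_mem hmin
    have hmpos : 0 < m := hpos m hmL
    have hmle : ∀ v ∈ L, m ≤ v := fun v hv => PySem.List.min?_isMin hmin v hv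
    by_cases h1 : 1 < G
    · -- A says True: witness x = G works
      have hGm : G ∣ m.natAbs := foldl_gcd_dvd_mem L 0 m hmL
      have hGlem : (G : Int) ≤ m := by
        have := Nat.le_of_dvd (by omega) hGm
        omega
      have hx : (G : Int) ∈ PySem.List.pyRange 2 (m + 1) :=
        PySem.List.mem_pyRange_one.mpr ⟨by exact_mod_cast h1, by omega⟩
      have hall : L.all (fun v => PySem.Int.mod v (G : Int) == 0) = true := by
        rw [List.all_eq_true]
        intro v hv
        have : (G : Int) ∣ v := by
          have := foldl_gcd_dvd_mem L 0 v hv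
          have : (G : Int).natAbs ∣ v.natAbs := by simpa using this
          exact Int.natAbs_dvd_natAbs.mp this
        simp [PySem.Int.mod_eq_zero_iff_dvd, this]
      have hany : (PySem.List.pyRange 2 (m + 1)).any (fun x => L.all (fun v => PySem.Int.mod v x == 0)) = true :=
        List.any_eq_true.mpr ⟨(G : Int), hx, hall⟩
      simp only [hfold, hany]
      simp [show (1 : Int) < (G : Nat) from by exact_mod_cast h1]
    · -- A says False: no x in 2..m can divide all (it would divide G)
      have hnone : (PySem.List.pyRange 2 (m + 1)).any (fun x => L.all (fun v => PySem.Int.mod v x == 0)) = false := by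
        rw [List.any_eq_false]
        intro x hx
        obtain ⟨hx2, hxm⟩ := PySem.List.mem_pyRange_one.mp hx
        intro hallx
        have hdvdall : ∀ v ∈ L, x.toNat ∣ v.natAbs := by
          intro v hv
          have := (List.all_eq_true.mp hallx) v hv
          have hxd : x ∣ v := (PySem.Int.mod_eq_zero_iff_dvd v x).mp (by simpa using this)
          have hnn : x.natAbs ∣ v.natAbs := Int.natAbs_dvd_natAbs.mpr hxd
          have hxe : x.toNat = x.natAbs := by omega
          rw [hxe]; exact hnn
        have hxG : x.toNat ∣ G := dvd_foldl_gcd L 0 x.toNat (Nat.dvd_zero _) hdvdall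
        have hGm : G ∣ m.natAbs := foldl_gcd_dvd_mem L 0 m hmL
        have hGne : G ≠ 0 := by
          intro h0
          rw [h0] at hGm
          have := Nat.eq_zero_of_zero_dvd hGm
          omega
        have : x.toNat ≤ G := Nat.le_of_dvd (Nat.pos_of_ne_zero hGne) hxG
        omega
      simp only [hfold, hnone]
      simp [show ¬ (1 : Int) < (G : Nat) from by exact_mod_cast h1]

-- Both ports build the same frequency dictionary: PySem.Dict.counter deck.
lemma dictA_eq_counter (deck : List Int) :
    (PySem.List.pyRange 0 (PySem.List.len deck)).foldl
      (fun d i =>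
        if !(d.contains (PySem.List.pyGetD deck i 0)) then d.insert (PySem.List.pyGetD deck i 0) 1
        else d.insert (PySem.List.pyGetD deck i 0) (d.getD (PySem.List.pyGetD deck i 0) 0 + 1))
      PySem.Dict.empty = PySem.Dict.counter deck := by
  have h1 := PySem.List.foldl_pyRange_pyGetD deck 0
    (fun (d : PySem.Dict Int Int) x => if !(d.contains x) then d.insert x 1 else d.insert x (d.getD x 0 + 1))
    PySem.Dict.empty (le_refl 0)
  simp only [Int.toNat_zero, List.drop_zero] at h1
  refine h1.trans ?_
  rw [PySem.List.foldl_congr_mem deck _ (fun d c => d.insert c (d.getD c 0 + 1)) _ ?_]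
  · exact PySem.Dict.foldl_insert_getD_add_one_eq_counter deck
  · intro d x _
    by_cases hc : d.contains x
    · simp [hc]
    · simp only [Bool.eq_false_iff.mpr hc, Bool.not_false, if_true]
      rw [PySem.Dict.getD_of_not_contains d 0 (Bool.eq_false_iff.mpr hc)]
      norm_num

-- Every value of the counter of deck is positive.
lemma counter_values_pos (deck : List Int) :
    ∀ v ∈ (PySem.Dict.counter deck).values, 0 < v := by
  intro v hv
  simp only [PySem.Dict.values, PySem.Dict.items_counter, List.map_map, List.mem_map, Function.comp] at hv
  obtain ⟨k, hk, rfl⟩ := hv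
  have hkd : k ∈ deck := by simpa [pysem] using hk
  have : 0 < deck.count k := List.count_pos_iff.mpr hkd
  exact_mod_cast this

-- ===== VERDICT (by name: the statement is the Claim_ definition above) =====
theorem hasGroupsSizeX_spec : Claim_equal_hasGroupsSizeX := by
  intro deck _
  unfold Spec_hasGroupsSizeX hasGroupsSizeX hasGroupsSizeX_alt
  simp only [dictA_eq_counter, PySem.Dict.foldl_insert_getD_add_one_eq_counter]
  exact gcd_trial_equiv ((PySem.Dict.counter deck).values) (counter_values_pos deck)
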